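-- pv_equiv track=rewrite | github.com/buer2233/ai-test-platform | Django_project/api_automation/services/result_storage_service.py | _extract_key_headers
-- ===== SOURCE A (Python) =====
-- from typing import Dict, Any, Optional
--
-- def _extract_key_headers(headers: Dict[str, str]) -> Dict[str, str]:
--     """
--     提取关键请求头
--
--     Args:
--         headers: 完整请求头
--
--     Returns:
--         关键请求头
--     """
--     key_headers = [
--         'Content-Type',
--         'Authorization',
--         'Accept',
--         'User-Agent',
--         'X-Requested-With',
--     ]
--
--     result = {}
--     for key in key_headers:
--         # 不区分大小写查找
--         for header_key, header_value in headers.items():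
--             if header_key.lower() == key.lower():
--                 result[key] = header_value
--                 break
--
--     return result
-- ===== SOURCE B (Python) =====
-- def _extract_key_headers(headers):
--     key_headers = [
--         'Content-Type',
--         'Authorization',
--         'Accept',
--         'User-Agent',
--         'X-Requested-With',
--     ]
--     index = {}
--     for header_key, header_value in headers.items():
--         index.setdefault(header_key.lower(), header_value)
--     return {key: index[key.lower()] for key in key_headers if key.lower() in index}
-- ===== Notes on version B (the rewrite author's own statement) =====
-- stated objective: idiomatic
-- what changed: Replaces the nested scan (for each of 5 canonical keys, re-scan all headers) with a single pass building a lowercase-keyed first-occurrence index via setdefault, then a dict comprehension over the canonical keys.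
import Mathlib
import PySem

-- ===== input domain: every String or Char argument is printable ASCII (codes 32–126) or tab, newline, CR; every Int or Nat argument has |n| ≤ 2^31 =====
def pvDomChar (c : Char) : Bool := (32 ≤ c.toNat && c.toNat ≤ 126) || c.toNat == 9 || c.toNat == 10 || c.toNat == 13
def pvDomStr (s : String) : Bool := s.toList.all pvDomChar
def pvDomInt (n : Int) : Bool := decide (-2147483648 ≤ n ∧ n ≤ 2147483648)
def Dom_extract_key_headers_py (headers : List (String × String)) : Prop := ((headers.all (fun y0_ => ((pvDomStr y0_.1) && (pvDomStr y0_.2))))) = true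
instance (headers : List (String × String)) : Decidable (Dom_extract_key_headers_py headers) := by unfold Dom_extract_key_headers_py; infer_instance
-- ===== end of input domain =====

-- B builds a lowercase-keyed first-occurrence index in one pass (setdefault), then looks each
-- canonical key up, instead of A's rescan of all headers for each of the 5 keys (idiomatic rewrite).

-- ===== PORT A =====
-- inner 'for header_key, header_value in headers.items(): if …: …; break' loop, returning the
-- value found (break = return on first match)
def pvFindA (headers : List (String × String)) (key : String) : Option String :=
  match headers with
  | [] => none
  | (hk, hv) :: rest =>
      if PySem.Str.lower hk = PySem.Str.lower key then some hv else pvFindA rest key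

def extract_key_headers_py (headers : List (String × String)) : List (String × String) :=
  let key_headers := ["Content-Type", "Authorization", "Accept", "User-Agent", "X-Requested-With"]
  let result := key_headers.foldl (fun (result : PySem.Dict String String) key =>
      match pvFindA headers key with
      | some hv => result.insert key hv
      | none => result) PySem.Dict.empty
  result.items

-- ===== PORT B =====
def extract_key_headers_py_alt (headers : List (String × String)) : List (String × String) :=
  let key_headers := ["Content-Type", "Authorization", "Accept", "User-Agent", "X-Requested-With"]
  let index := headers.foldl
      (fun (d : PySem.Dict String String) p => d.setdefault (PySem.Str.lower p.1) p.2)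
      PySem.Dict.empty
  -- dict comprehension over the distinct canonical keys: filtered map, in key_headers order
  key_headers.filterMap (fun key =>
    (index.get? (PySem.Str.lower key)).map (fun v => (key, v)))

-- ===== PRECONDITION & SPEC =====
def Spec_extract_key_headers_py (headers : List (String × String)) (out : List (String × String)) : Prop := out = extract_key_headers_py_alt headers
instance (headers : List (String × String)) (out : List (String × String)) : Decidable (Spec_extract_key_headers_py headers out) := by unfold Spec_extract_key_headers_py; infer_instance

-- ===== CLAIM (what is proved, stated in full; the proofs are below) =====
def Claim_equal_extract_key_headers_py : Prop := ∀ (headers : List (String × String)), Dom_extract_key_headers_py headers → Spec_extract_key_headers_py headers (extract_key_headers_py headers)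

-- ===== LEMMAS AND PROOFS =====

-- B's setdefault index looked up at (lower key) yields exactly A's first-match scan for key
theorem pv_index_get (headers : List (String × String)) (d : PySem.Dict String String)
    (key : String) :
    (headers.foldl (fun (d : PySem.Dict String String) p =>
        d.setdefault (PySem.Str.lower p.1) p.2) d).get? (PySem.Str.lower key)
      = (d.get? (PySem.Str.lower key)).or (pvFindA headers key) := by
  induction headers generalizing d with
  | nil => simp [pvFindA]
  | cons p rest ih =>
    obtain ⟨hk, hv⟩ := p
    simp only [List.foldl_cons, pvFindA]
    rw [ih]
    by_cases he : PySem.Str.lower hk = PySem.Str.lower key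
    · rw [he, PySem.Dict.get?_setdefault_self]
      cases h : d.get? (PySem.Str.lower key) <;> simp
    · have hne : PySem.Str.lower key ≠ PySem.Str.lower hk := fun h => he (Eq.symm h)
      rw [PySem.Dict.get?_setdefault_of_ne d hv hne]
      simp [he]

theorem extract_key_headers_py_spec : Claim_equal_extract_key_headers_py := by
  intro headers _
  unfold Spec_extract_key_headers_py extract_key_headers_py extract_key_headers_py_alt
  have h : ∀ key : String,
      (headers.foldl (fun (d : PySem.Dict String String) p =>
          d.setdefault (PySem.Str.lower p.1) p.2) PySem.Dict.empty).get? (PySem.Str.lower key)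
        = pvFindA headers key := by
    intro key
    rw [pv_index_get]
    simp
  simp only [List.foldl_cons, List.foldl_nil, List.filterMap_cons, List.filterMap_nil, h]
  rcases pvFindA headers "Content-Type" with _ | v1 <;>
    rcases pvFindA headers "Authorization" with _ | v2 <;>
    rcases pvFindA headers "Accept" with _ | v3 <;>
    rcases pvFindA headers "User-Agent" with _ | v4 <;>
    rcases pvFindA headers "X-Requested-With" with _ | v5 <;>
    simp [PySem.Dict.insert, PySem.Dict.empty, PySem.Dict.contains]
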